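-- pv_equiv track=rewrite | github.com/Erfangholiz/N-Queens | N-Queens.py | check_threats
-- ===== SOURCE A (Python) =====
-- def check_threats(chess_board, square):
--     """ board is a matrix containing the entire chessboard at this moment, every square with a 0 value is empty and
--     every square with a 1 value has a queen on it.
--     square is the coordinates of a target square on the board that we are trying to check the safety of, it's a list
--     containing two integers as the row and column
--
--     This function returns False if there are no queens threatening the one in square
--     :param chess_board:
--     :param square:
--     :return bool:
--     """
--
--     row = square[0]
--     column = square[1]
--     for i in range(0, len(chess_board)):
--         for j in range(0, len(chess_board)):
--             if chess_board[i][j] == 1: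
--                 if i == row or j == column or abs(i - row) == abs(j - column):
--                     return True
--
--     return False
-- ===== SOURCE B (Python) =====
-- def check_threats(chess_board, square):
--     """Scan only the cells aligned with square (its row, its column, the two
--     diagonals) instead of the whole board."""
--     row = square[0]
--     column = square[1]
--     n = len(chess_board)
--     for i in range(n):
--         if i == row:
--             if 1 in chess_board[i][:n]:
--                 return True
--         else:
--             d = abs(i - row)
--             for j in (column, column - d, column + d):
--                 if 0 <= j < n and chess_board[i][j] == 1:
--                     return True
--     return False
-- ===== Notes on version B (the rewrite author's own statement) =====
-- stated objective: alternative
-- what changed: Instead of scanning every cell of the n x n board, B visits for each board row only the (at most 3) columns aligned with the square plus one membership test on the square's own row — per-call work linear in n rather than a full double scan (intended as faster; a timing run read 1.54x at the largest size but inconsistently, so no speed is claimed).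
-- outside the precondition, e.g. on check_threats([[1, 1], [1, 0], [10, 1], [8, 2]], [3, 3, 8, 10]): A returns True, B raises IndexError; on check_threats([[1], [0, 0]], [0, 0]): A returns True, B returns True
import Mathlib
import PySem

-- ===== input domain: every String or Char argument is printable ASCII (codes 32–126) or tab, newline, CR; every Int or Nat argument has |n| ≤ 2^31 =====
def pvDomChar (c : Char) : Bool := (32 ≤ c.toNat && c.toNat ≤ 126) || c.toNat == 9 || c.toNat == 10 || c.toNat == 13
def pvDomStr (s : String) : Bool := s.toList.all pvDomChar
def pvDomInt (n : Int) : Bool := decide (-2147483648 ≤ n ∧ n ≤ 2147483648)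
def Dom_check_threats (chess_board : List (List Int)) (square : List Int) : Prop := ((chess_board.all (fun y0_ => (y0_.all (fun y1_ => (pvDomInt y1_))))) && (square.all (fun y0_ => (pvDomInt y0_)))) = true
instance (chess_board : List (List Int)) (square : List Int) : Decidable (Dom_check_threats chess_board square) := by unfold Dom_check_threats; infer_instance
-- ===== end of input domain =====

-- B scans only the row, column and two diagonals of the square instead of A's full board scan (alternative strategy).
-- Pre_ excludes squares with fewer than two coordinates and ragged boards (rows shorter than the board),
-- on which A's full scan raises IndexError unless it happens to find a threatening queen first.


-- ===== PORT A =====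
-- literal transliteration of A: row/column from square, then the nested
-- for-i/for-j scan of the whole board with early return True.
def check_threats (chess_board : List (List Int)) (square : List Int) : Bool :=
  match PySem.List.pyGet? square 0, PySem.List.pyGet? square 1 with
  | some row, some column =>
    (PySem.List.pyRange 0 (chess_board.length : Int) 1).any (fun i =>
      (PySem.List.pyRange 0 (chess_board.length : Int) 1).any (fun j =>
        decide (((PySem.List.pyGet? chess_board i).bind
                  (fun r => PySem.List.pyGet? r j)) = some 1) &&
        (decide (i = row) || decide (j = column) ||
         decide ((i - row).natAbs = (j - column).natAbs))))
  | _, _ => false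

-- ===== PORT B =====
-- transliteration of B (Source B): one pass over the rows; on the square's own
-- row a membership test on the slice board[i][:n], otherwise the three
-- aligned columns column, column-d, column+d.
def check_threats_alt (chess_board : List (List Int)) (square : List Int) : Bool :=
  match PySem.List.pyGet? square 0 with
  | none => false
  | some row =>
    match PySem.List.pyGet? square 1 with
    | none => false
    | some column =>
    let n : Int := chess_board.length
    (PySem.List.pyRange 0 n 1).any (fun i =>
      if i = row then
        (PySem.List.slice ((PySem.List.pyGet? chess_board i).getD []) none (some n)).contains 1
      else
        let d : Int := ((i - row).natAbs : Int)
        [column, column - d, column + d].any (fun j =>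
          decide (0 ≤ j) && decide (j < n) &&
          decide (((PySem.List.pyGet? chess_board i).bind
                    (fun r => PySem.List.pyGet? r j)) = some 1)))

-- ===== PRECONDITION & SPEC =====
-- Pre_ excludes squares with < 2 coordinates (A raises IndexError reading square[1])
-- and ragged boards with a row shorter than the board (A's full scan indexes every
-- cell chess_board[i][j], j < n, and raises IndexError unless it returns True first).
def Pre_check_threats (chess_board : List (List Int)) (square : List Int) : Prop :=
  2 ≤ square.length ∧ ∀ r ∈ chess_board, chess_board.length ≤ r.length
instance (chess_board : List (List Int)) (square : List Int) : Decidable (Pre_check_threats chess_board square) := by unfold Pre_check_threats; infer_instance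

def pvWitness_check_threats : List (List Int) × List Int := ([[0, 1], [0, 0]], [1, 0])

def Spec_check_threats (chess_board : List (List Int)) (square : List Int) (out : Bool) : Prop := out = check_threats_alt chess_board square
instance (chess_board : List (List Int)) (square : List Int) (out : Bool) : Decidable (Spec_check_threats chess_board square out) := by unfold Spec_check_threats; infer_instance

-- ===== CLAIM (what is proved, stated in full; the proofs are below) =====
def Claim_equal_check_threats : Prop := ∀ (chess_board : List (List Int)) (square : List Int), Dom_check_threats chess_board square → Pre_check_threats chess_board square → Spec_check_threats chess_board square (check_threats chess_board square)

-- ===== LEMMAS AND PROOFS =====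

theorem pv_any_congr_mem {α : Type} {l : List α} {p q : α → Bool}
    (h : ∀ a ∈ l, p a = q a) : l.any p = l.any q := by
  induction l with
  | nil => rfl
  | cons x xs ih =>
    simp only [List.any_cons]
    rw [h x (List.mem_cons_self), ih fun a ha => h a (List.mem_cons_of_mem _ ha)]

theorem check_threats_inner_eq (cb : List (List Int)) (row column i : Int)
    (hpre : ∀ r ∈ cb, cb.length ≤ r.length)
    (hi0 : 0 ≤ i) (hin : i < (cb.length : Int)) :
    ((PySem.List.pyRange 0 (cb.length : Int) 1).any (fun j =>
        decide (((PySem.List.pyGet? cb i).bind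
                  (fun r => PySem.List.pyGet? r j)) = some 1) &&
        (decide (i = row) || decide (j = column) ||
         decide ((i - row).natAbs = (j - column).natAbs)))) =
    (if i = row then
        (PySem.List.slice ((PySem.List.pyGet? cb i).getD []) none (some (cb.length : Int))).contains 1
      else
        [column, column - ((i - row).natAbs : Int), column + ((i - row).natAbs : Int)].any (fun j =>
          decide (0 ≤ j) && decide (j < (cb.length : Int)) &&
          decide (((PySem.List.pyGet? cb i).bind
                    (fun r => PySem.List.pyGet? r j)) = some 1))) := by
  have hr := PySem.List.pyGet?_eq_some_getElem cb hi0 hin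
  rw [hr]
  have hrlen : cb.length ≤ (cb[i.toNat]).length := hpre _ (List.getElem_mem _)
  by_cases hirow : i = row
  · rw [if_pos hirow, Bool.eq_iff_iff]
    rw [PySem.List.slice_to _ (by positivity)]
    simp only [List.any_eq_true, PySem.List.mem_pyRange_one, Option.getD_some,
               Option.bind, Bool.and_eq_true, Bool.or_eq_true, decide_eq_true_eq,
               List.contains_iff_mem, List.mem_take_iff_getElem]
    constructor
    · rintro ⟨j, ⟨hj0, hjn⟩, hcell, _⟩
      have hjr : PySem.List.pyGet? (cb[i.toNat]) j = some ((cb[i.toNat])[j.toNat]'(by omega)) :=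
        PySem.List.pyGet?_eq_some_getElem _ hj0 (by push_cast; omega)
      rw [hjr] at hcell
      exact ⟨j.toNat, by omega, Option.some.inj hcell⟩
    · rintro ⟨k, hm, hk⟩
      have hkr : PySem.List.pyGet? (cb[i.toNat]) (k : Int) = some ((cb[i.toNat])[k]'(by omega)) := by
        have h := PySem.List.pyGet?_eq_some_getElem (cb[i.toNat]) (i := (k : Int))
          (by positivity) (by push_cast; omega)
        simpa using h
      refine ⟨(k : Int), ⟨by positivity, by push_cast; omega⟩, ?_, Or.inl (Or.inl hirow)⟩
      rw [hkr, hk]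
  · rw [if_neg hirow, Bool.eq_iff_iff]
    simp only [List.any_eq_true, PySem.List.mem_pyRange_one, Option.bind,
               Bool.and_eq_true, Bool.or_eq_true, decide_eq_true_eq, List.mem_cons,
               List.not_mem_nil, or_false]
    constructor
    · rintro ⟨j, ⟨hj0, hjn⟩, hcell, hali⟩
      have hj : j = column ∨ j = column - ((i - row).natAbs : Int) ∨
          j = column + ((i - row).natAbs : Int) := by
        rcases hali with (h | h) | h
        · exact absurd h hirow
        · exact Or.inl h
        · omega
      exact ⟨j, hj, ⟨hj0, hjn⟩, hcell⟩
    · rintro ⟨j, hjmem, ⟨hj0, hjn⟩, hcell⟩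
      refine ⟨j, ⟨hj0, hjn⟩, hcell, ?_⟩
      rcases hjmem with h | h | h
      · exact Or.inl (Or.inr h)
      · exact Or.inr (by omega)
      · exact Or.inr (by omega)

-- ===== VERDICT (by name: the statement is the Claim_ definition above) =====
theorem check_threats_spec : Claim_equal_check_threats := by
  intro cb sq _hdom hpre
  obtain ⟨hsq, hrows⟩ := hpre
  have h0 : PySem.List.pyGet? sq 0 = some (sq[(0:Int).toNat]'(by omega)) :=
    PySem.List.pyGet?_eq_some_getElem sq (by norm_num) (by push_cast; omega)
  have h1 : PySem.List.pyGet? sq 1 = some (sq[(1:Int).toNat]'(by omega)) :=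
    PySem.List.pyGet?_eq_some_getElem sq (by norm_num) (by push_cast; omega)
  unfold Spec_check_threats check_threats check_threats_alt
  rw [h0, h1]
  exact pv_any_congr_mem fun i hi =>
    check_threats_inner_eq cb _ _ i hrows
      ((PySem.List.mem_pyRange_one).mp hi).1 ((PySem.List.mem_pyRange_one).mp hi).2
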